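-- pv_equiv track=rewrite | github.com/TonyStark7862/Lineage_code | cross_attribute_analysis.py | generate_column_pairs
-- ===== SOURCE A (Python) =====
-- def generate_column_pairs(columns1, columns2, mappings, mode="train"):
--     """
--     Generate pairs of columns with their matching labels.
--     """
--     pair_labels = {}
--
--     # Create all possible combinations with labels
--     for i, col1 in enumerate(columns1):
--         for j, col2 in enumerate(columns2):
--             # Check if this pair is in the mapping
--             if (col1, col2) in mappings or (col2, col1) in mappings:
--                 pair_labels[(i, j)] = 1
--             else:
--                 pair_labels[(i, j)] = 0
--
--     # Balance classes for training mode
--     if mode == "train":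
--         positive_count = sum(1 for v in pair_labels.values() if v == 1)
--         negative_count = len(pair_labels) - positive_count
--
--         # If imbalanced, remove some negative examples
--         if positive_count > 0 and positive_count < 0.1 * len(pair_labels):
--             pairs_to_remove = []
--             for pair, label in pair_labels.items():
--                 if label == 0 and len(pairs_to_remove) < negative_count - 9 * positive_count:
--                     pairs_to_remove.append(pair)
--
--             for pair in pairs_to_remove:
--                 del pair_labels[pair]
--
--     return pair_labels
-- ===== SOURCE B (Python) =====
-- def generate_column_pairs(columns1, columns2, mappings, mode="train"):
--     """
--     Generate pairs of columns with their matching labels.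
--     Mappings-driven: instead of testing every grid pair against the mappings,
--     locate the matching (i, j) index pairs from the mappings themselves, then
--     emit the grid once, dropping surplus negatives with an inline skip counter.
--     """
--     positive = set()
--     for a, b in mappings:
--         rows = [i for i, c in enumerate(columns1) if c == a]
--         cols = [j for j, c in enumerate(columns2) if c == b]
--         rows_r = [i for i, c in enumerate(columns1) if c == b]
--         cols_r = [j for j, c in enumerate(columns2) if c == a]
--         positive.update((i, j) for i in rows for j in cols)
--         positive.update((i, j) for i in rows_r for j in cols_r)
--
--     total = len(columns1) * len(columns2)
--     pos = len(positive)
--     skip = total - 10 * pos if mode == "train" and 0 < pos < 0.1 * total else 0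
--
--     result = {}
--     for i in range(len(columns1)):
--         for j in range(len(columns2)):
--             if (i, j) in positive:
--                 result[(i, j)] = 1
--             elif skip > 0:
--                 skip -= 1
--             else:
--                 result[(i, j)] = 0
--     return result
-- ===== Notes on version B (the rewrite author's own statement) =====
-- stated objective: alternative
-- what changed: B never tests the grid pairs against the mappings: it derives the positive (i,j) index set from the mappings themselves (locating each mapped name's positions in columns1/columns2), then emits the grid in one pass with an inline skip counter for dropped negatives, replacing A's per-pair membership scan plus build/collect/delete phases; the per-pair scan of mappings disappears, though the grid pass itself still dominates on large inputs.
import Mathlib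
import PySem

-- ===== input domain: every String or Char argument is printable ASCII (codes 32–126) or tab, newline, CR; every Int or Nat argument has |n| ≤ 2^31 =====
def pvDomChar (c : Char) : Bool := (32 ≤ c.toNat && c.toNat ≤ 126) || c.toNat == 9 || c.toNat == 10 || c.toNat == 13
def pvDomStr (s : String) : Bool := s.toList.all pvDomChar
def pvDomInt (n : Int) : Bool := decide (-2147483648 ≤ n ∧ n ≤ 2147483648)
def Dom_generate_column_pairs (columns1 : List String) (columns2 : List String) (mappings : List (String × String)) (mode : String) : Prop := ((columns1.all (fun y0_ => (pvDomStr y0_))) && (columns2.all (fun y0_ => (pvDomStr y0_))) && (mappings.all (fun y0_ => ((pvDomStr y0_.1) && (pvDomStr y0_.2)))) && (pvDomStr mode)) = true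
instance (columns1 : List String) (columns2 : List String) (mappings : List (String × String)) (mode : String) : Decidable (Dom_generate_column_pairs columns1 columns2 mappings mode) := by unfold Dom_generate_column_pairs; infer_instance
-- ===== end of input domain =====

-- B derives the positive (i,j) index set from the mappings themselves (locating each mapped
-- name's positions in the column lists) and emits the grid in one pass with an inline skip
-- counter, instead of A's per-pair membership scan over mappings plus build/collect/delete
-- phases (objective: alternative — the per-pair scan of mappings disappears, though the grid
-- pass itself still dominates, so B is not measurably faster overall).
-- In both ports the float guard `positive_count < 0.1 * len(pair_labels)` is transliterated as
-- the integer test `10 * positive_count < total`: the two guards can only disagree where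
-- 10*pos = total up to float rounding, and there the number of negatives to remove is
-- total - 10*pos = 0, so the returned value is the same either way.

-- ===== PORT A =====
def generate_column_pairs (columns1 : List String) (columns2 : List String) (mappings : List (String × String)) (mode : String) : List (Int × Int × Int) :=
  let pair_labels : PySem.Dict (Int × Int) Int :=
    (PySem.List.enumerate columns1).foldl (fun d ic =>
      (PySem.List.enumerate columns2).foldl (fun d jc =>
        if mappings.contains (ic.2, jc.2) || mappings.contains (jc.2, ic.2) then
          d.insert (ic.1, jc.1) 1
        else
          d.insert (ic.1, jc.1) 0) d) PySem.Dict.empty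
  let pair_labels :=
    if mode == "train" then
      let positive_count : Int := ((pair_labels.values.filter (fun v => v == 1)).length : Int)
      let negative_count : Int := (pair_labels.size : Int) - positive_count
      -- float guard `positive_count < 0.1 * len(pair_labels)` (see header note)
      if 0 < positive_count && 10 * positive_count < (pair_labels.size : Int) then
        let pairs_to_remove : List (Int × Int) :=
          pair_labels.items.foldl (fun acc pl =>
            if pl.2 == 0 && ((acc.length : Int) < negative_count - 9 * positive_count) then
              acc ++ [pl.1]
            else acc) []
        pairs_to_remove.foldl (fun d p => d.erase p) pair_labels
      else pair_labels
    else pair_labels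
  pair_labels.items.map (fun p => (p.1.1, p.1.2, p.2))

-- ===== PORT B =====
-- `[i for i, c in enumerate(xs) if c == a]` of Source B
def pvRows (xs : List String) (a : String) : List Int :=
  ((PySem.List.enumerate xs).filter (fun p => p.2 == a)).map (fun p => p.1)

-- the `for a, b in mappings: … positive.update(…)` loop of Source B
def pvPositive (columns1 : List String) (columns2 : List String) (mappings : List (String × String)) : PySem.Set (Int × Int) :=
  mappings.foldl (fun s ab =>
    PySem.Set.update
      (PySem.Set.update s
        ((pvRows columns1 ab.1).flatMap (fun i => (pvRows columns2 ab.2).map (fun j => (i, j)))))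
      ((pvRows columns1 ab.2).flatMap (fun i => (pvRows columns2 ab.1).map (fun j => (i, j)))))
    PySem.Set.empty

def generate_column_pairs_alt (columns1 : List String) (columns2 : List String) (mappings : List (String × String)) (mode : String) : List (Int × Int × Int) :=
  let positive : PySem.Set (Int × Int) := pvPositive columns1 columns2 mappings
  let total : Int := (columns1.length : Int) * (columns2.length : Int)
  let pos : Int := (PySem.Set.len positive : Int)
  -- float guard `0 < pos < 0.1 * total` of Source B (see header note)
  let skip : Int := if mode == "train" && (0 < pos && 10 * pos < total) then total - 10 * pos else 0
  -- the grid loop of Source B; `result[(i, j)] = …` on the all-distinct keys (i, j) appends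
  let res : Int × List (Int × Int × Int) :=
    (PySem.List.pyRange 0 (columns1.length : Int) 1).foldl (fun st i =>
      (PySem.List.pyRange 0 (columns2.length : Int) 1).foldl (fun st j =>
        if PySem.Set.contains positive (i, j) then (st.1, st.2 ++ [(i, j, (1 : Int))])
        else if st.1 > 0 then (st.1 - 1, st.2)
        else (st.1, st.2 ++ [(i, j, (0 : Int))])) st) ((skip, []) : Int × List (Int × Int × Int))
  res.2

-- ===== PRECONDITION & SPEC =====
def Spec_generate_column_pairs (columns1 : List String) (columns2 : List String) (mappings : List (String × String)) (mode : String) (out : List (Int × Int × Int)) : Prop := out = generate_column_pairs_alt columns1 columns2 mappings mode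
instance (columns1 : List String) (columns2 : List String) (mappings : List (String × String)) (mode : String) (out : List (Int × Int × Int)) : Decidable (Spec_generate_column_pairs columns1 columns2 mappings mode out) := by unfold Spec_generate_column_pairs; infer_instance

-- ===== CLAIM (what is proved, stated in full; the proofs are below) =====
def Claim_equal_generate_column_pairs : Prop := ∀ (columns1 : List String) (columns2 : List String) (mappings : List (String × String)) (mode : String), Dom_generate_column_pairs columns1 columns2 mappings mode → Spec_generate_column_pairs columns1 columns2 mappings mode (generate_column_pairs columns1 columns2 mappings mode)

-- ===== LEMMAS AND PROOFS =====

-- the row-major labeled pair list both programs are about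
def pvL (columns1 columns2 : List String) (mappings : List (String × String)) : List ((Int × Int) × Int) :=
  (PySem.List.enumerate columns1).flatMap (fun ic =>
    (PySem.List.enumerate columns2).map (fun jc =>
      ((ic.1, jc.1),
        if mappings.contains (ic.2, jc.2) || mappings.contains (jc.2, ic.2) then (1 : Int) else 0)))

-- drop the first `skip` zero-labeled entries
def pvKeep : Int → List ((Int × Int) × Int) → List ((Int × Int) × Int)
  | _, [] => []
  | skip, p :: rest =>
    if p.2 == 0 && skip > 0 then pvKeep (skip - 1) rest else p :: pvKeep skip rest

-- number of positive labels, table size, and the skip count both programs agree on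
def pvP (columns1 columns2 : List String) (mappings : List (String × String)) : Int :=
  (((pvL columns1 columns2 mappings).filter (fun p => p.2 == 1)).length : Int)
def pvT (columns1 columns2 : List String) (mappings : List (String × String)) : Int :=
  ((pvL columns1 columns2 mappings).length : Int)
def pvSkipVal (columns1 columns2 : List String) (mappings : List (String × String)) (mode : String) : Int :=
  if mode = "train" ∧ 0 < pvP columns1 columns2 mappings ∧ 10 * pvP columns1 columns2 mappings < pvT columns1 columns2 mappings then
    pvT columns1 columns2 mappings - 10 * pvP columns1 columns2 mappings
  else 0

theorem pvInnerBuild (columns2 : List String) (mappings : List (String × String)) (i : Int) (colv : String) :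
    ∀ (t : Int) (d : PySem.Dict (Int × Int) Int),
      (∀ p ∈ d.items, p.1.1 < i ∨ p.1.2 < t) →
      ((PySem.List.enumerate columns2 t).foldl (fun d jc =>
          if mappings.contains (colv, jc.2) || mappings.contains (jc.2, colv) then
            d.insert (i, jc.1) 1
          else
            d.insert (i, jc.1) 0) d).items
      = d.items ++ (PySem.List.enumerate columns2 t).map (fun jc =>
          ((i, jc.1), if mappings.contains (colv, jc.2) || mappings.contains (jc.2, colv) then (1 : Int) else 0)) := by
  induction columns2 with
  | nil => intro t d _; simp [PySem.List.enumerate]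
  | cons c cs ih =>
    intro t d hd
    rw [PySem.List.enumerate_cons]
    simp only [List.foldl_cons, List.map_cons]
    have hnc : d.contains (i, t) = false := by
      rw [PySem.Dict.contains_eq_decide_mem_keys]
      simp only [decide_eq_false_iff_not, PySem.Dict.keys, List.mem_map]
      rintro ⟨p, hp, hpk⟩
      rcases hd p hp with h | h <;> rw [hpk] at h <;> simp at h
    have hstep : ∀ v : Int, (d.insert (i, t) v).items = d.items ++ [((i, t), v)] :=
      fun v => PySem.Dict.items_insert_of_not_contains d v hnc
    by_cases hc : (mappings.contains (colv, c) || mappings.contains (c, colv)) = true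
    all_goals
      simp only [hc, if_pos, if_neg, Bool.not_eq_true]
    all_goals
      rw [ih (t + 1) _ (by
        intro p hp
        rw [hstep] at hp
        rcases List.mem_append.1 hp with h | h
        · rcases hd p h with h' | h'
          · exact Or.inl h'
          · exact Or.inr (by omega)
        · simp at h; subst h; right; simp), hstep]
      simp

theorem pvOuterBuild (columns1 columns2 : List String) (mappings : List (String × String)) :
    ∀ (s : Int) (d : PySem.Dict (Int × Int) Int),
      (∀ p ∈ d.items, p.1.1 < s) →
      ((PySem.List.enumerate columns1 s).foldl (fun d ic =>
        (PySem.List.enumerate columns2).foldl (fun d jc =>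
          if mappings.contains (ic.2, jc.2) || mappings.contains (jc.2, ic.2) then
            d.insert (ic.1, jc.1) 1
          else
            d.insert (ic.1, jc.1) 0) d) d).items
      = d.items ++ (PySem.List.enumerate columns1 s).flatMap (fun ic =>
          (PySem.List.enumerate columns2).map (fun jc =>
            ((ic.1, jc.1),
              if mappings.contains (ic.2, jc.2) || mappings.contains (jc.2, ic.2) then (1 : Int) else 0))) := by
  induction columns1 with
  | nil => intro s d _; simp [PySem.List.enumerate]
  | cons c cs ih =>
    intro s d hd
    rw [PySem.List.enumerate_cons]
    simp only [List.foldl_cons, List.flatMap_cons]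
    have hrow := pvInnerBuild columns2 mappings s c 0 d (fun p hp => Or.inl (hd p hp))
    rw [ih (s + 1) _ (by
      intro p hp
      rw [hrow] at hp
      rcases List.mem_append.1 hp with h | h
      · have := hd p h; omega
      · rcases List.mem_map.1 h with ⟨jc, _, hjc⟩
        rw [← hjc]; simp), hrow]
    simp

theorem pvBuild (columns1 columns2 : List String) (mappings : List (String × String)) :
    ((PySem.List.enumerate columns1).foldl (fun d ic =>
      (PySem.List.enumerate columns2).foldl (fun d jc =>
        if mappings.contains (ic.2, jc.2) || mappings.contains (jc.2, ic.2) then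
          d.insert (ic.1, jc.1) 1
        else
          d.insert (ic.1, jc.1) 0) d) (PySem.Dict.empty : PySem.Dict (Int × Int) Int)).items
    = pvL columns1 columns2 mappings := by
  have := pvOuterBuild columns1 columns2 mappings 0 PySem.Dict.empty (by intro p hp; simp [PySem.Dict.empty] at hp)
  simpa [pvL, PySem.Dict.empty] using this

theorem pvKeep_nonpos : ∀ (k : Int) (L : List ((Int × Int) × Int)), k ≤ 0 → pvKeep k L = L := by
  intro k L
  induction L generalizing k with
  | nil => intro _; rfl
  | cons p rest ih =>
    intro hk
    rw [pvKeep]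
    have : (p.2 == 0 && decide (k > 0)) = false := by
      simp only [Bool.and_eq_false_iff, decide_eq_false_iff_not]; right; omega
    rw [this, if_neg (by simp), ih k hk]

theorem pvRemoveList (k : Int) : ∀ (M : List ((Int × Int) × Int)) (acc : List (Int × Int)),
    M.foldl (fun acc pl => if pl.2 == 0 && ((acc.length : Int) < k) then acc ++ [pl.1] else acc) acc
    = acc ++ ((M.filter (fun pl => pl.2 == 0)).map (fun pl => pl.1)).take (k - acc.length).toNat := by
  intro M
  induction M with
  | nil => intro acc; simp
  | cons pl rest ih =>
    intro acc
    simp only [List.foldl_cons]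
    by_cases h0 : (pl.2 == 0) = true
    · by_cases hk : ((acc.length : Int) < k)
      · rw [if_pos (by rw [h0, Bool.true_and]; exact decide_eq_true hk), ih]
        rw [show (List.filter (fun pl => pl.2 == 0) (pl :: rest)) = pl :: List.filter (fun pl => pl.2 == 0) rest from List.filter_cons_of_pos h0, List.map_cons]
        have h1 : (k - (acc ++ [pl.1]).length : Int).toNat = (k - acc.length).toNat - 1 := by
          simp only [List.length_append, List.length_cons, List.length_nil]; omega
        have h2 : (k - acc.length).toNat = ((k - acc.length).toNat - 1) + 1 := by omega
        rw [h1, h2, List.take_succ_cons]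
        simp
      · rw [if_neg (by simp [hk]), ih]
        have h1 : (k - acc.length : Int).toNat = 0 := by omega
        rw [show (List.filter (fun pl => pl.2 == 0) (pl :: rest)) = pl :: List.filter (fun pl => pl.2 == 0) rest from List.filter_cons_of_pos h0, List.map_cons]
        simp [h1]
    · rw [if_neg (by simp [h0]), ih,
        show (List.filter (fun pl => pl.2 == 0) (pl :: rest)) = List.filter (fun pl => pl.2 == 0) rest from List.filter_cons_of_neg (by simpa using h0)]

theorem pvEraseFold : ∀ (R : List (Int × Int)) (d : PySem.Dict (Int × Int) Int),
    (R.foldl (fun d p => d.erase p) d).items = d.items.filter (fun q => !R.contains q.1) := by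
  intro R
  induction R with
  | nil => intro d; simp
  | cons r R ih =>
    intro d
    simp only [List.foldl_cons]
    rw [ih, PySem.Dict.erase, List.filter_filter]
    exact List.filter_congr (by intro a _; by_cases hh : a.1 = r <;> simp [hh, Bool.and_comm])

theorem pvLabels01 (columns1 columns2 : List String) (mappings : List (String × String)) :
    ∀ p ∈ pvL columns1 columns2 mappings, p.2 = 0 ∨ p.2 = 1 := by
  intro p hp
  rcases List.mem_flatMap.1 hp with ⟨ic, _, hmem⟩
  rcases List.mem_map.1 hmem with ⟨jc, _, hjc⟩
  subst hjc
  by_cases hc : (mappings.contains (ic.2, jc.2) || mappings.contains (jc.2, ic.2)) = true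
  · right; rw [if_pos hc]
  · left; rw [if_neg hc]

theorem pvKeyGE (columns2 : List String) :
    ∀ (columns1 : List String) (s : Int) (x : Int × Int),
      x ∈ (PySem.List.enumerate columns1 s).flatMap (fun ic =>
        (PySem.List.enumerate columns2).map (fun jc => ((ic.1, jc.1) : Int × Int))) → s ≤ x.1 := by
  intro columns1
  induction columns1 with
  | nil => intro s x hx; simp [PySem.List.enumerate] at hx
  | cons c cs ih =>
    intro s x hx
    rw [PySem.List.enumerate_cons, List.flatMap_cons] at hx
    rcases List.mem_append.1 hx with h | h
    · rcases List.mem_map.1 h with ⟨jc, _, hjc⟩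
      rw [← hjc]
    · have := ih (s + 1) x h; omega

theorem pvKeysNodup (columns2 : List String) :
    ∀ (columns1 : List String) (s : Int),
      ((PySem.List.enumerate columns1 s).flatMap (fun ic =>
        (PySem.List.enumerate columns2).map (fun jc => ((ic.1, jc.1) : Int × Int)))).Nodup := by
  intro columns1
  induction columns1 with
  | nil => intro s; simp [PySem.List.enumerate]
  | cons c cs ih =>
    intro s
    rw [PySem.List.enumerate_cons, List.flatMap_cons]
    apply List.Nodup.append
    · have hpw := PySem.List.pairwise_lt_enumerate (xs := columns2) (s := 0)
      exact List.Pairwise.map _ (fun a b hab => by simp [Prod.ext_iff]; omega) hpw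
    · exact ih (s + 1)
    · intro a ha hb
      rcases List.mem_map.1 ha with ⟨jc, _, hjc⟩
      have := pvKeyGE columns2 cs (s + 1) a hb
      rw [← hjc] at this
      simp at this

theorem pvFilterKeep : ∀ (L : List ((Int × Int) × Int)), (L.map (fun p => p.1)).Nodup → ∀ (k : Int),
    L.filter (fun q => !((((L.filter (fun pl => pl.2 == 0)).map (fun pl => pl.1)).take k.toNat).contains q.1))
    = pvKeep k L := by
  intro L
  induction L with
  | nil => intro _ k; rfl
  | cons q rest ih =>
    intro hnd k
    rw [List.map_cons, List.nodup_cons] at hnd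
    obtain ⟨hq, hrest⟩ := hnd
    by_cases h0 : (q.2 == 0) = true
    · rw [show (List.filter (fun pl => pl.2 == 0) (q :: rest)) = q :: List.filter (fun pl => pl.2 == 0) rest from List.filter_cons_of_pos h0, List.map_cons]
      by_cases hk : 0 < k
      · have ht : k.toNat = (k - 1).toNat + 1 := by omega
        rw [ht, List.take_succ_cons]
        rw [List.filter_cons_of_neg (by simp)]
        rw [show (List.filter (fun x => !((q.1 :: List.take (k-1).toNat (List.map (fun pl => pl.1) (List.filter (fun pl => pl.2 == 0) rest))).contains x.1)) rest)
             = List.filter (fun x => !((List.take (k-1).toNat (List.map (fun pl => pl.1) (List.filter (fun pl => pl.2 == 0) rest))).contains x.1)) rest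
           from List.filter_congr (fun x hx => by
             have hne : x.1 ≠ q.1 := fun he => hq (he ▸ List.mem_map_of_mem hx)
             simp [hne])]
        rw [ih hrest (k - 1), pvKeep, if_pos (by simp [h0, hk])]
      · have ht : k.toNat = 0 := by omega
        rw [ht, List.take_zero]
        rw [pvKeep_nonpos k (q :: rest) (by omega)]
        simp
    · rw [show (List.filter (fun pl => pl.2 == 0) (q :: rest)) = List.filter (fun pl => pl.2 == 0) rest from List.filter_cons_of_neg (by simpa using h0)]
      have hqnot : q.1 ∉ ((rest.filter (fun pl => pl.2 == 0)).map (fun pl => pl.1)).take k.toNat := by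
        intro hmem
        exact hq (by
          rcases List.mem_map.1 (List.mem_of_mem_take hmem) with ⟨pl, hpl, hple⟩
          exact hple ▸ List.mem_map_of_mem (List.mem_of_mem_filter hpl))
      rw [List.filter_cons_of_pos (by simpa using hqnot)]
      rw [ih hrest k, pvKeep, if_neg (by simp [h0])]

theorem pvLKeysNodup (columns1 columns2 : List String) (mappings : List (String × String)) :
    ((pvL columns1 columns2 mappings).map (fun p => p.1)).Nodup := by
  have h := pvKeysNodup columns2 columns1 0
  have he : (pvL columns1 columns2 mappings).map (fun p => p.1)
      = (PySem.List.enumerate columns1 0).flatMap (fun ic =>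
          (PySem.List.enumerate columns2).map (fun jc => ((ic.1, jc.1) : Int × Int))) := by
    simp [pvL, List.map_flatMap, List.map_map, Function.comp_def]
  rw [he]
  exact h

-- ===== A-side characterisation: A = map of pvKeep =====

theorem pvAeq (columns1 columns2 : List String) (mappings : List (String × String)) (mode : String) :
    generate_column_pairs columns1 columns2 mappings mode
    = (pvKeep (pvSkipVal columns1 columns2 mappings mode) (pvL columns1 columns2 mappings)).map (fun p => (p.1.1, p.1.2, p.2)) := by
  simp only [generate_column_pairs]
  have hitems := pvBuild columns1 columns2 mappings
  by_cases hm : mode = "train"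
  · rw [if_pos (by simp [hm])]
    simp only [PySem.Dict.values, PySem.Dict.size]
    simp only [hitems]
    have hP : (((pvL columns1 columns2 mappings).map (fun p => p.2)).filter (fun v => v == 1)).length
        = ((pvL columns1 columns2 mappings).filter (fun p => p.2 == 1)).length := by
      rw [List.filter_map]
      simp [Function.comp_def]
    rw [apply_ite PySem.Dict.items, pvEraseFold]
    simp only [hitems, hP]
    rw [show ((List.filter (fun p => p.2 == 1) (pvL columns1 columns2 mappings)).length : Int) = pvP columns1 columns2 mappings from rfl,
        show ((pvL columns1 columns2 mappings).length : Int) = pvT columns1 columns2 mappings from rfl]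
    by_cases hg : 0 < pvP columns1 columns2 mappings ∧ 10 * pvP columns1 columns2 mappings < pvT columns1 columns2 mappings
    · rw [if_pos (by
        simp only [Bool.and_eq_true, decide_eq_true_eq]
        exact hg)]
      rw [pvRemoveList (pvT columns1 columns2 mappings - pvP columns1 columns2 mappings - 9 * pvP columns1 columns2 mappings) (pvL columns1 columns2 mappings) []]
      have harith : (pvT columns1 columns2 mappings - pvP columns1 columns2 mappings - 9 * pvP columns1 columns2 mappings - (([] : List (Int × Int)).length : Int)).toNat
          = (pvSkipVal columns1 columns2 mappings mode).toNat := by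
        simp only [pvSkipVal, if_pos (And.intro hm hg), List.length_nil, Nat.cast_zero]
        omega
      rw [List.nil_append, harith, pvFilterKeep (pvL columns1 columns2 mappings) (pvLKeysNodup columns1 columns2 mappings) (pvSkipVal columns1 columns2 mappings mode)]
    · rw [if_neg (by
        simp only [Bool.and_eq_true, decide_eq_true_eq]
        exact hg)]
      have hks : pvSkipVal columns1 columns2 mappings mode = 0 := by
        rw [pvSkipVal, if_neg]
        intro h
        exact hg h.2
      rw [pvKeep_nonpos (pvSkipVal columns1 columns2 mappings mode) _ hks.le]
  · rw [if_neg (by simp [hm]), hitems]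
    have hks : pvSkipVal columns1 columns2 mappings mode = 0 := by
      rw [pvSkipVal, if_neg]
      intro h
      exact hm h.1
    rw [pvKeep_nonpos (pvSkipVal columns1 columns2 mappings mode) _ hks.le]

-- ===== B-side characterisation =====

theorem mem_pvRows (xs : List String) (a : String) (i : Int) :
    i ∈ pvRows xs a ↔ ∃ (k : Nat), ∃ (_ : k < xs.length), i = (k : Int) ∧ xs[k] = a := by
  simp only [pvRows, List.mem_map, List.mem_filter, PySem.List.mem_enumerate_iff]
  constructor
  · rintro ⟨p, ⟨⟨k, hk, rfl⟩, hpa⟩, rfl⟩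
    exact ⟨k, hk, by simp, by simpa using hpa⟩
  · rintro ⟨k, hk, rfl, ha⟩
    exact ⟨(0 + (k : Int), xs[k]), ⟨⟨k, hk, rfl⟩, by simpa using ha⟩, by simp⟩

theorem mem_pvProd (rows cols : List Int) (x : Int × Int) :
    x ∈ rows.flatMap (fun i => cols.map (fun j => ((i, j) : Int × Int))) ↔ x.1 ∈ rows ∧ x.2 ∈ cols := by
  simp only [List.mem_flatMap, List.mem_map]
  constructor
  · rintro ⟨i, hi, j, hj, rfl⟩; exact ⟨hi, hj⟩
  · rintro ⟨hi, hj⟩; exact ⟨x.1, hi, x.2, hj, rfl⟩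

theorem mem_pvPositive (columns1 columns2 : List String) (mappings : List (String × String)) (x : Int × Int) :
    x ∈ pvPositive columns1 columns2 mappings
    ↔ ∃ ab ∈ mappings,
        (x.1 ∈ pvRows columns1 ab.1 ∧ x.2 ∈ pvRows columns2 ab.2) ∨
        (x.1 ∈ pvRows columns1 ab.2 ∧ x.2 ∈ pvRows columns2 ab.1) := by
  have main : ∀ (m : List (String × String)) (s : PySem.Set (Int × Int)),
      x ∈ m.foldl (fun s ab =>
        PySem.Set.update
          (PySem.Set.update s
            ((pvRows columns1 ab.1).flatMap (fun i => (pvRows columns2 ab.2).map (fun j => (i, j)))))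
          ((pvRows columns1 ab.2).flatMap (fun i => (pvRows columns2 ab.1).map (fun j => (i, j))))) s
      ↔ x ∈ s ∨ ∃ ab ∈ m,
          (x.1 ∈ pvRows columns1 ab.1 ∧ x.2 ∈ pvRows columns2 ab.2) ∨
          (x.1 ∈ pvRows columns1 ab.2 ∧ x.2 ∈ pvRows columns2 ab.1) := by
    intro m
    induction m with
    | nil => intro s; simp
    | cons ab rest ih =>
      intro s
      simp only [List.foldl_cons]
      rw [ih]
      simp only [PySem.Set.mem_update, mem_pvProd, List.mem_cons]
      constructor
      · rintro (((h | h) | h) | ⟨cd, hcd, h⟩)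
        · exact Or.inl h
        · exact Or.inr ⟨ab, Or.inl rfl, Or.inl h⟩
        · exact Or.inr ⟨ab, Or.inl rfl, Or.inr h⟩
        · exact Or.inr ⟨cd, Or.inr hcd, h⟩
      · rintro (h | ⟨cd, (rfl | hcd), h⟩)
        · exact Or.inl (Or.inl (Or.inl h))
        · rcases h with h | h
          · exact Or.inl (Or.inl (Or.inr h))
          · exact Or.inl (Or.inr h)
        · exact Or.inr ⟨cd, hcd, h⟩
  rw [pvPositive, main]
  simp [PySem.Set.empty]

theorem nodup_pvPositive (columns1 columns2 : List String) (mappings : List (String × String)) :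
    (pvPositive columns1 columns2 mappings).Nodup := by
  rw [pvPositive]
  have main : ∀ (m : List (String × String)) (s : PySem.Set (Int × Int)), s.Nodup →
      (m.foldl (fun s ab =>
        PySem.Set.update
          (PySem.Set.update s
            ((pvRows columns1 ab.1).flatMap (fun i => (pvRows columns2 ab.2).map (fun j => (i, j)))))
          ((pvRows columns1 ab.2).flatMap (fun i => (pvRows columns2 ab.1).map (fun j => (i, j))))) s).Nodup := by
    intro m
    induction m with
    | nil => intro s hs; exact hs
    | cons ab rest ih =>
      intro s hs
      simp only [List.foldl_cons]
      exact ih _ (PySem.Set.nodup_update _ _ (PySem.Set.nodup_update _ _ hs))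
  exact main mappings PySem.Set.empty (by simp [PySem.Set.empty])

theorem mem_pvL (columns1 columns2 : List String) (mappings : List (String × String)) (p : (Int × Int) × Int) :
    p ∈ pvL columns1 columns2 mappings
    ↔ ∃ (k : Nat), ∃ (_ : k < columns1.length), ∃ (l : Nat), ∃ (_ : l < columns2.length),
        p = (((k : Int), (l : Int)),
          if mappings.contains (columns1[k], columns2[l]) || mappings.contains (columns2[l], columns1[k]) then (1 : Int) else 0) := by
  simp only [pvL, List.mem_flatMap, List.mem_map, PySem.List.mem_enumerate_iff]
  constructor
  · rintro ⟨ic, ⟨k, hk, rfl⟩, jc, ⟨l, hl, rfl⟩, rfl⟩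
    exact ⟨k, hk, l, hl, by simp⟩
  · rintro ⟨k, hk, l, hl, rfl⟩
    exact ⟨(0 + (k : Int), columns1[k]), ⟨k, hk, rfl⟩, (0 + (l : Int), columns2[l]), ⟨l, hl, rfl⟩, by simp⟩

theorem pvPosIff (columns1 columns2 : List String) (mappings : List (String × String))
    (k l : Nat) (hk : k < columns1.length) (hl : l < columns2.length) :
    (((k : Int), (l : Int)) ∈ pvPositive columns1 columns2 mappings)
    ↔ (mappings.contains (columns1[k], columns2[l]) || mappings.contains (columns2[l], columns1[k])) = true := by
  rw [mem_pvPositive]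
  simp only [mem_pvRows, Bool.or_eq_true, List.contains_iff_mem]
  constructor
  · rintro ⟨ab, hab, (⟨⟨k', hk', hkk, ha⟩, ⟨l', hl', hll, hb⟩⟩ | ⟨⟨k', hk', hkk, ha⟩, ⟨l', hl', hll, hb⟩⟩)⟩
    · left
      have : k = k' := by exact_mod_cast hkk
      subst this
      have : l = l' := by exact_mod_cast hll
      subst this
      rw [ha, hb]
      exact (Prod.mk.eta (p := ab)) ▸ hab
    · right
      have : k = k' := by exact_mod_cast hkk
      subst this
      have : l = l' := by exact_mod_cast hll
      subst this
      rw [ha, hb]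
      exact (Prod.mk.eta (p := ab)) ▸ hab
  · rintro (h | h)
    · exact ⟨(columns1[k], columns2[l]), h, Or.inl ⟨⟨k, hk, rfl, rfl⟩, ⟨l, hl, rfl, rfl⟩⟩⟩
    · exact ⟨(columns2[l], columns1[k]), h, Or.inr ⟨⟨k, hk, rfl, rfl⟩, ⟨l, hl, rfl, rfl⟩⟩⟩

theorem pvContainsLabel (columns1 columns2 : List String) (mappings : List (String × String)) :
    ∀ p ∈ pvL columns1 columns2 mappings,
      PySem.Set.contains (pvPositive columns1 columns2 mappings) p.1 = (p.2 == 1) := by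
  intro p hp
  rcases (mem_pvL columns1 columns2 mappings p).1 hp with ⟨k, hk, l, hl, rfl⟩
  by_cases hc : (mappings.contains (columns1[k], columns2[l]) || mappings.contains (columns2[l], columns1[k])) = true
  · rw [if_pos hc]
    simp only [PySem.Set.contains_eq_listContains]
    simp [(pvPosIff columns1 columns2 mappings k l hk hl).2 hc]
  · rw [if_neg hc]
    simp only [PySem.Set.contains_eq_listContains]
    simp
    intro hmem
    exact hc ((pvPosIff columns1 columns2 mappings k l hk hl).1 hmem)

theorem pvPosLen (columns1 columns2 : List String) (mappings : List (String × String)) :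
    (pvPositive columns1 columns2 mappings).length
    = ((pvL columns1 columns2 mappings).filter (fun p => p.2 == 1)).length := by
  have hN1 := nodup_pvPositive columns1 columns2 mappings
  have hN2 : (((pvL columns1 columns2 mappings).filter (fun p => p.2 == 1)).map (fun p => p.1)).Nodup :=
    ((pvLKeysNodup columns1 columns2 mappings).sublist
      (((pvL columns1 columns2 mappings).filter_sublist (p := fun p => p.2 == 1)).map (fun p => p.1)))
  have hmem : ∀ x, x ∈ pvPositive columns1 columns2 mappings
      ↔ x ∈ ((pvL columns1 columns2 mappings).filter (fun p => p.2 == 1)).map (fun p => p.1) := by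
    intro x
    simp only [List.mem_map, List.mem_filter]
    constructor
    · intro hx
      rcases (mem_pvPositive columns1 columns2 mappings x).1 hx with ⟨ab, hab, h⟩
      have hx' : ∃ (k : Nat), ∃ (_ : k < columns1.length), ∃ (l : Nat), ∃ (_ : l < columns2.length), x = ((k : Int), (l : Int)) := by
        rcases h with ⟨h1, h2⟩ | ⟨h1, h2⟩ <;>
        · rcases (mem_pvRows _ _ _).1 h1 with ⟨k, hk, hxk, _⟩
          rcases (mem_pvRows _ _ _).1 h2 with ⟨l, hl, hxl, _⟩
          exact ⟨k, hk, l, hl, by rw [← hxk, ← hxl]⟩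
      rcases hx' with ⟨k, hk, l, hl, rfl⟩
      have hc := (pvPosIff columns1 columns2 mappings k l hk hl).1 hx
      refine ⟨(((k : Int), (l : Int)), 1), ⟨?_, by simp⟩, rfl⟩
      rw [mem_pvL]
      exact ⟨k, hk, l, hl, by rw [if_pos hc]⟩
    · rintro ⟨p, ⟨hp, h1⟩, rfl⟩
      rcases (mem_pvL columns1 columns2 mappings p).1 hp with ⟨k, hk, l, hl, rfl⟩
      by_cases hc : (mappings.contains (columns1[k], columns2[l]) || mappings.contains (columns2[l], columns1[k])) = true
      · exact (pvPosIff columns1 columns2 mappings k l hk hl).2 hc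
      · rw [if_neg hc] at h1; simp at h1
  calc (pvPositive columns1 columns2 mappings).length
      = (((pvL columns1 columns2 mappings).filter (fun p => p.2 == 1)).map (fun p => p.1)).length :=
        ((List.perm_ext_iff_of_nodup hN1 hN2).2 hmem).length_eq
    _ = _ := List.length_map ..

theorem pvLlen (columns1 columns2 : List String) (mappings : List (String × String)) :
    (pvL columns1 columns2 mappings).length = columns1.length * columns2.length := by
  simp only [pvL, List.length_flatMap, List.length_map, PySem.List.length_enumerate]
  rw [List.map_const', List.sum_replicate, PySem.List.length_enumerate, smul_eq_mul]

theorem pvPassGen (g : (Int × Int) → Bool) :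
    ∀ (L : List ((Int × Int) × Int)) (skip : Int) (acc : List (Int × Int × Int)),
      (∀ p ∈ L, g p.1 = (p.2 == 1)) → (∀ p ∈ L, p.2 = 0 ∨ p.2 = 1) →
      (L.foldl (fun st p =>
          if g p.1 then (st.1, st.2 ++ [(p.1.1, p.1.2, (1 : Int))])
          else if st.1 > 0 then (st.1 - 1, st.2)
          else (st.1, st.2 ++ [(p.1.1, p.1.2, (0 : Int))])) (skip, acc)).2
      = acc ++ (pvKeep skip L).map (fun p => (p.1.1, p.1.2, p.2)) := by
  intro L
  induction L with
  | nil => intro skip acc _ _; simp [pvKeep]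
  | cons p rest ih =>
    intro skip acc hg h01
    have hgp := hg p (by simp)
    simp only [List.foldl_cons]
    rcases h01 p (by simp) with h0 | h1
    · rw [if_neg (by simp [hgp, h0])]
      by_cases hs : skip > 0
      · rw [if_pos hs]
        rw [ih (skip - 1) acc (fun q hq => hg q (by simp [hq])) (fun q hq => h01 q (by simp [hq]))]
        rw [pvKeep, if_pos (by simp [h0, hs])]
      · rw [if_neg hs]
        rw [ih skip _ (fun q hq => hg q (by simp [hq])) (fun q hq => h01 q (by simp [hq]))]
        rw [pvKeep, if_neg (by simp [hs]), List.map_cons, h0]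
        simp
    · rw [if_pos (by rw [hgp, h1]; decide)]
      rw [ih skip _ (fun q hq => hg q (by simp [hq])) (fun q hq => h01 q (by simp [hq]))]
      rw [pvKeep, if_neg (by simp [h1]), List.map_cons, h1]
      simp

theorem pvGridFold (columns1 columns2 : List String) (mappings : List (String × String))
    (g : (Int × Int) → Bool) (hg : ∀ p ∈ pvL columns1 columns2 mappings, g p.1 = (p.2 == 1)) (skip : Int) :
    ((PySem.List.pyRange 0 (columns1.length : Int) 1).foldl (fun st i =>
      (PySem.List.pyRange 0 (columns2.length : Int) 1).foldl (fun st j =>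
        if g (i, j) then (st.1, st.2 ++ [(i, j, (1 : Int))])
        else if st.1 > 0 then (st.1 - 1, st.2)
        else (st.1, st.2 ++ [(i, j, (0 : Int))])) st) ((skip, []) : Int × List (Int × Int × Int))).2
    = (pvKeep skip (pvL columns1 columns2 mappings)).map (fun p => (p.1.1, p.1.2, p.2)) := by
  have h1 : PySem.List.pyRange 0 (columns1.length : Int) 1 = (PySem.List.enumerate columns1).map (fun p => p.1) := by
    rw [PySem.List.map_fst_enumerate]; norm_num
  have h2 : PySem.List.pyRange 0 (columns2.length : Int) 1 = (PySem.List.enumerate columns2).map (fun p => p.1) := by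
    rw [PySem.List.map_fst_enumerate]; norm_num
  have hflat : ((pvL columns1 columns2 mappings).foldl (fun st p =>
        if g p.1 then (st.1, st.2 ++ [(p.1.1, p.1.2, (1 : Int))])
        else if st.1 > 0 then (st.1 - 1, st.2)
        else (st.1, st.2 ++ [(p.1.1, p.1.2, (0 : Int))])) ((skip, []) : Int × List (Int × Int × Int)))
      = ((PySem.List.pyRange 0 (columns1.length : Int) 1).foldl (fun st i =>
          (PySem.List.pyRange 0 (columns2.length : Int) 1).foldl (fun st j =>
            if g (i, j) then (st.1, st.2 ++ [(i, j, (1 : Int))])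
            else if st.1 > 0 then (st.1 - 1, st.2)
            else (st.1, st.2 ++ [(i, j, (0 : Int))])) st) ((skip, []) : Int × List (Int × Int × Int))) := by
    rw [h1, h2]
    simp only [pvL, List.foldl_flatMap, List.foldl_map]
  rw [← hflat]
  exact pvPassGen g (pvL columns1 columns2 mappings) skip []
    hg (pvLabels01 columns1 columns2 mappings)

theorem pvBeq (columns1 columns2 : List String) (mappings : List (String × String)) (mode : String) :
    generate_column_pairs_alt columns1 columns2 mappings mode
    = (pvKeep (pvSkipVal columns1 columns2 mappings mode) (pvL columns1 columns2 mappings)).map (fun p => (p.1.1, p.1.2, p.2)) := by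
  simp only [generate_column_pairs_alt]
  have hpos : PySem.Set.len (pvPositive columns1 columns2 mappings) = pvP columns1 columns2 mappings := by
    have h := pvPosLen columns1 columns2 mappings
    simp only [PySem.Set.len, pvP]
    exact_mod_cast h
  have htot : (columns1.length : Int) * (columns2.length : Int) = pvT columns1 columns2 mappings := by
    simp only [pvT, pvLlen]; push_cast; ring
  rw [hpos, htot]
  have hskip : (if mode == "train" && (decide (0 < pvP columns1 columns2 mappings) && decide (10 * pvP columns1 columns2 mappings < pvT columns1 columns2 mappings)) then pvT columns1 columns2 mappings - 10 * pvP columns1 columns2 mappings else 0)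
      = pvSkipVal columns1 columns2 mappings mode := by
    rw [pvSkipVal]
    by_cases h : mode = "train" ∧ 0 < pvP columns1 columns2 mappings ∧ 10 * pvP columns1 columns2 mappings < pvT columns1 columns2 mappings
    · rw [if_pos (by simp [h.1, h.2.1, h.2.2]), if_pos h]
    · rw [if_neg (by
        simp only [Bool.and_eq_true, beq_iff_eq, decide_eq_true_eq]
        intro hc
        exact h ⟨hc.1, hc.2.1, hc.2.2⟩), if_neg h]
  rw [hskip]
  exact pvGridFold columns1 columns2 mappings
    (fun x => PySem.Set.contains (pvPositive columns1 columns2 mappings) x)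
    (pvContainsLabel columns1 columns2 mappings) (pvSkipVal columns1 columns2 mappings mode)

-- ===== VERDICT (by name: the statement is the Claim_ definition above) =====
theorem generate_column_pairs_spec : Claim_equal_generate_column_pairs := by
  intro columns1 columns2 mappings mode _hdom
  unfold Spec_generate_column_pairs
  rw [pvAeq, pvBeq]
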